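-- pv_equiv track=rewrite | github.com/musicofhel/ShapeletForecasting | src/dtw/dtw_calculator.py | _expand_window
-- ===== SOURCE A (Python) =====
-- from typing import Tuple, Optional, List, Dict, Union
--
-- def _expand_window(path: List[Tuple[int, int]],
--                   len_x: int,
--                   len_y: int,
--                   radius: int) -> List[Tuple[int, int]]:
--     """Expand low-resolution path to high-resolution window"""
--     window = set()
--
--     for i, j in path:
--         for x in range(max(0, 2*i - radius), min(len_x, 2*i + radius + 1)):
--             for y in range(max(0, 2*j - radius), min(len_y, 2*j + radius + 1)):
--                 window.add((x, y))
--
--     return sorted(list(window))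
-- ===== SOURCE B (Python) =====
-- def _expand_window(path, len_x, len_y, radius):
--     """Expand low-resolution path to high-resolution window.
--
--     Column sweep: bucket each point's y-interval into every column of its
--     x-range, then walk columns in order, merge each column's sorted
--     intervals, and emit cells directly in sorted order (no global set/sort).
--     """
--     cols = {}
--     for i, j in path:
--         y0 = max(0, 2 * j - radius)
--         y1 = min(len_y, 2 * j + radius + 1)
--         if y0 < y1:
--             for x in range(max(0, 2 * i - radius), min(len_x, 2 * i + radius + 1)):
--                 cols.setdefault(x, []).append((y0, y1))
--     out = []
--     for x in sorted(cols):
--         merged = []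
--         cur = None
--         for a, b in sorted(cols[x]):
--             if cur is None:
--                 cur = (a, b)
--             elif a <= cur[1]:
--                 cur = (cur[0], max(cur[1], b))
--             else:
--                 merged.append(cur)
--                 cur = (a, b)
--         if cur is not None:
--             merged.append(cur)
--         for a, b in merged:
--             for y in range(a, b):
--                 out.append((x, y))
--     return out
-- ===== Notes on version B (the rewrite author's own statement) =====
-- stated objective: faster
-- what changed: Instead of hashing every high-res cell into one global set and sorting it, B buckets each path point's clamped y-interval into every column of its x-range and then sweeps the populated columns in ascending order, merging each column's sorted intervals and emitting cells directly in sorted order.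
import Mathlib
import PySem

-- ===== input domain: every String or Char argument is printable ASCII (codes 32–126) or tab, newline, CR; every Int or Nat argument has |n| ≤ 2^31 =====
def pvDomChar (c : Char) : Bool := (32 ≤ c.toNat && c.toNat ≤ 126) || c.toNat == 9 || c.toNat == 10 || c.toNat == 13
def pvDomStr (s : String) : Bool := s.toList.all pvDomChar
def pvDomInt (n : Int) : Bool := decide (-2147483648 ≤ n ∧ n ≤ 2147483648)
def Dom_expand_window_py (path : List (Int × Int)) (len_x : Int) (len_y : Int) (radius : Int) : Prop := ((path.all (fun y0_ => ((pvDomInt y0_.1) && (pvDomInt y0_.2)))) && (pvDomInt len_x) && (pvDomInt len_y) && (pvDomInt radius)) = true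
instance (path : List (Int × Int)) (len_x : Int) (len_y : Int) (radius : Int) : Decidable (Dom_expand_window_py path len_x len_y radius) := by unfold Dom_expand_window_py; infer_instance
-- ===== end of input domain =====

-- B replaces A's global cell set + full sort by a column sweep with per-column interval
-- merging, emitting the cells already in sorted order (objective: faster, by a constant
-- factor measured on the timing inputs).

-- ===== PORT A =====
def expand_window_py (path : List (Int × Int)) (len_x : Int) (len_y : Int) (radius : Int) : List (Int × Int) :=
  let window : PySem.Set (Int × Int) :=
    path.foldl (fun w p =>
      (PySem.List.pyRange (max 0 (2*p.1 - radius)) (min len_x (2*p.1 + radius + 1)) 1).foldl (fun w x =>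
        (PySem.List.pyRange (max 0 (2*p.2 - radius)) (min len_y (2*p.2 + radius + 1)) 1).foldl (fun w y =>
          PySem.Set.add w (x, y)) w) w) PySem.Set.empty
  PySem.List.sorted2 window (fun q => q.1) (fun q => q.2)

-- ===== PORT B =====
-- one merge step of Source B's `for a, b in sorted(cols[x])` loop (state: merged list, current interval)
def pvMergeStep (st : List (Int × Int) × Option (Int × Int)) (ab : Int × Int) :
    List (Int × Int) × Option (Int × Int) :=
  match st.2 with
  | none => (st.1, some ab)
  | some c => if ab.1 ≤ c.2 then (st.1, some (c.1, max c.2 ab.2)) else (st.1 ++ [c], some ab)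

-- Source B's trailing `if cur is not None: merged.append(cur)`
def pvFlush (st : List (Int × Int) × Option (Int × Int)) : List (Int × Int) :=
  match st.2 with
  | none => st.1
  | some c => st.1 ++ [c]

def expand_window_py_alt (path : List (Int × Int)) (len_x : Int) (len_y : Int) (radius : Int) : List (Int × Int) :=
  let cols : PySem.Dict Int (List (Int × Int)) :=
    path.foldl (fun d p =>
      let y0 := max 0 (2*p.2 - radius)
      let y1 := min len_y (2*p.2 + radius + 1)
      if y0 < y1 then
        (PySem.List.pyRange (max 0 (2*p.1 - radius)) (min len_x (2*p.1 + radius + 1)) 1).foldl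
          (fun d x => d.modify x [] (fun l => l ++ [(y0, y1)])) d
      else d) PySem.Dict.empty
  (PySem.List.sorted cols.keys (fun k => k)).foldl (fun out x =>
    let merged := pvFlush ((PySem.List.sorted2 (cols.getD x []) (fun q => q.1) (fun q => q.2)).foldl
      pvMergeStep ([], none))
    merged.foldl (fun out iv => out ++ (PySem.List.pyRange iv.1 iv.2 1).map (fun y => (x, y))) out) []

-- ===== PRECONDITION & SPEC =====
def Spec_expand_window_py (path : List (Int × Int)) (len_x : Int) (len_y : Int) (radius : Int) (out : List (Int × Int)) : Prop := out = expand_window_py_alt path len_x len_y radius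
instance (path : List (Int × Int)) (len_x : Int) (len_y : Int) (radius : Int) (out : List (Int × Int)) : Decidable (Spec_expand_window_py path len_x len_y radius out) := by unfold Spec_expand_window_py; infer_instance

-- ===== CLAIM (what is proved, stated in full; the proofs are below) =====
def Claim_equal_expand_window_py : Prop := ∀ (path : List (Int × Int)) (len_x : Int) (len_y : Int) (radius : Int), Dom_expand_window_py path len_x len_y radius → Spec_expand_window_py path len_x len_y radius (expand_window_py path len_x len_y radius)

-- ===== LEMMAS AND PROOFS =====

-- strict lexicographic order on cells (Python's tuple `<` on distinct pairs)
def pvLexLT (u v : Int × Int) : Prop := u.1 < v.1 ∨ (u.1 = v.1 ∧ u.2 < v.2)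

-- cell q lies in the window rectangle contributed by path point p
def pvInWin (len_x len_y radius : Int) (p q : Int × Int) : Prop :=
  max 0 (2*p.1 - radius) ≤ q.1 ∧ q.1 < min len_x (2*p.1 + radius + 1) ∧
  max 0 (2*p.2 - radius) ≤ q.2 ∧ q.2 < min len_y (2*p.2 + radius + 1)

-- A's window set, named for the proofs
def pvWindow (path : List (Int × Int)) (len_x : Int) (len_y : Int) (radius : Int) : PySem.Set (Int × Int) :=
  path.foldl (fun w p =>
    (PySem.List.pyRange (max 0 (2*p.1 - radius)) (min len_x (2*p.1 + radius + 1)) 1).foldl (fun w x =>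
      (PySem.List.pyRange (max 0 (2*p.2 - radius)) (min len_y (2*p.2 + radius + 1)) 1).foldl (fun w y =>
        PySem.Set.add w (x, y)) w) w) PySem.Set.empty

-- B's column dict, named for the proofs
def pvCols (path : List (Int × Int)) (len_x : Int) (len_y : Int) (radius : Int) : PySem.Dict Int (List (Int × Int)) :=
  path.foldl (fun d p =>
    let y0 := max 0 (2*p.2 - radius)
    let y1 := min len_y (2*p.2 + radius + 1)
    if y0 < y1 then
      (PySem.List.pyRange (max 0 (2*p.1 - radius)) (min len_x (2*p.1 + radius + 1)) 1).foldl
        (fun d x => d.modify x [] (fun l => l ++ [(y0, y1)])) d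
    else d) PySem.Dict.empty

-- the intervals bucketed into column x, in path order
def pvIvs (path : List (Int × Int)) (len_x : Int) (len_y : Int) (radius : Int) (x : Int) : List (Int × Int) :=
  (path.filter (fun p => decide (max 0 (2*p.2 - radius) < min len_y (2*p.2 + radius + 1)) &&
      decide (max 0 (2*p.1 - radius) ≤ x) && decide (x < min len_x (2*p.1 + radius + 1)))).map
    (fun p => (max 0 (2*p.2 - radius), min len_y (2*p.2 + radius + 1)))

def pvMerged (path : List (Int × Int)) (len_x len_y radius x : Int) : List (Int × Int) :=
  pvFlush ((PySem.List.sorted2 (pvIvs path len_x len_y radius x) (fun q => q.1) (fun q => q.2)).foldl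
    pvMergeStep ([], none))

lemma pv_mem_ivs (path : List (Int × Int)) (len_x len_y radius x : Int) (iv : Int × Int) :
    iv ∈ pvIvs path len_x len_y radius x ↔ ∃ p ∈ path,
      (max 0 (2*p.2 - radius) < min len_y (2*p.2 + radius + 1)) ∧
      max 0 (2*p.1 - radius) ≤ x ∧ x < min len_x (2*p.1 + radius + 1) ∧
      iv = (max 0 (2*p.2 - radius), min len_y (2*p.2 + radius + 1)) := by
  simp only [pvIvs, List.mem_map, List.mem_filter, Bool.and_eq_true, decide_eq_true_eq]
  constructor
  · rintro ⟨p, ⟨hp, ⟨h1, h2⟩, h3⟩, hEq⟩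
    exact ⟨p, hp, h1, h2, h3, hEq.symm⟩
  · rintro ⟨p, hp, h1, h2, h3, hEq⟩
    exact ⟨p, ⟨hp, ⟨h1, h2⟩, h3⟩, hEq.symm⟩

-- y is covered by one of the intervals
def pvCov (ms : List (Int × Int)) (y : Int) : Prop := ∃ iv ∈ ms, iv.1 ≤ y ∧ y < iv.2

lemma pvCov_append (l1 l2 : List (Int × Int)) (y : Int) :
    pvCov (l1 ++ l2) y ↔ pvCov l1 y ∨ pvCov l2 y := by
  simp [pvCov, List.mem_append, or_and_right, exists_or]

-- generic membership of a set-like foldl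
lemma pv_mem_foldl {α β : Type} (l : List β) (g : List α → β → List α) (P : β → α → Prop) (q : α)
    (hg : ∀ w b, b ∈ l → (q ∈ g w b ↔ q ∈ w ∨ P b q)) :
    ∀ s, q ∈ l.foldl g s ↔ q ∈ s ∨ ∃ b ∈ l, P b q := by
  induction l with
  | nil => simp
  | cons h t ih =>
    intro s
    rw [List.foldl_cons, ih (fun w b hb => hg w b (List.mem_cons_of_mem _ hb)),
      hg s h List.mem_cons_self]
    simp only [List.mem_cons, exists_eq_or_imp]
    tauto

-- generic Nodup preservation of a foldl
lemma pv_nodup_foldl {α β : Type} (l : List β) (g : List α → β → List α)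
    (hg : ∀ w b, b ∈ l → w.Nodup → (g w b).Nodup) :
    ∀ s : List α, s.Nodup → (l.foldl g s).Nodup := by
  induction l with
  | nil => exact fun s h => h
  | cons h t ih =>
    intro s hs
    exact ih (fun w b hb => hg w b (List.mem_cons_of_mem _ hb)) _
      (hg s h List.mem_cons_self hs)

lemma pv_mem_window (path : List (Int × Int)) (len_x len_y radius : Int) (q : Int × Int) :
    q ∈ pvWindow path len_x len_y radius ↔ ∃ p ∈ path, pvInWin len_x len_y radius p q := by
  unfold pvWindow
  rw [pv_mem_foldl path _ (fun p q =>
      ∃ x ∈ PySem.List.pyRange (max 0 (2*p.1 - radius)) (min len_x (2*p.1 + radius + 1)) 1,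
      ∃ y ∈ PySem.List.pyRange (max 0 (2*p.2 - radius)) (min len_y (2*p.2 + radius + 1)) 1,
      q = (x, y)) q ?_ PySem.Set.empty]
  · constructor
    · rintro ((h : q ∈ ([] : List (Int × Int))) | ⟨p, hp, x, hx, y, hy, rfl⟩)
      · simp at h
      · rw [PySem.List.mem_pyRange_one] at hx hy
        exact ⟨p, hp, hx.1, hx.2, hy.1, hy.2⟩
    · rintro ⟨p, hp, h1, h2, h3, h4⟩
      refine Or.inr ⟨p, hp, q.1, ?_, q.2, ?_, rfl⟩
      · rw [PySem.List.mem_pyRange_one]; exact ⟨h1, h2⟩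
      · rw [PySem.List.mem_pyRange_one]; exact ⟨h3, h4⟩
  · intro w p _
    rw [pv_mem_foldl _ _ (fun x q =>
        ∃ y ∈ PySem.List.pyRange (max 0 (2*p.2 - radius)) (min len_y (2*p.2 + radius + 1)) 1,
        q = (x, y)) q ?_ w]
    · intro w' x _
      rw [pv_mem_foldl _ _ (fun y q => q = (x, y)) q (fun w'' y _ => PySem.Set.mem_add w'' _ q) w']

lemma pv_nodup_window (path : List (Int × Int)) (len_x len_y radius : Int) :
    (pvWindow path len_x len_y radius).Nodup := by
  unfold pvWindow
  refine pv_nodup_foldl _ _ (fun w p _ hw => ?_) _ List.nodup_nil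
  refine pv_nodup_foldl _ _ (fun w' x _ hw' => ?_) _ hw
  exact pv_nodup_foldl _ _ (fun w'' y _ hw'' => PySem.Set.nodup_add w'' _ hw'') _ hw'

-- sorted2 on pairs IS sorted with the lexicographic key
lemma pv_sorted2_eq_sorted_lex (xs : List (Int × Int)) :
    PySem.List.sorted2 xs (fun q => q.1) (fun q => q.2) =
      PySem.List.sorted xs (fun q => toLex (q.1, q.2)) := by
  rw [PySem.List.sorted_eq_foldl_insertBy]
  show List.foldl _ [] xs = _
  congr 1
  funext acc a
  congr 1
  funext u v
  show (decide (u.1 < v.1) || !decide (v.1 < u.1) && decide (u.2 < v.2)) =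
    decide (toLex (u.1, u.2) < toLex (v.1, v.2))
  rcases lt_trichotomy u.1 v.1 with h | h | h <;>
    simp [Prod.Lex.lt_iff, h, not_lt_of_gt]

lemma pv_sorted2_eq_of_pairwise (xs ys : List (Int × Int)) (hp : ys.Perm xs)
    (hs : ys.Pairwise pvLexLT) :
    PySem.List.sorted2 xs (fun q => q.1) (fun q => q.2) = ys := by
  rw [pv_sorted2_eq_sorted_lex]
  refine PySem.List.sorted_eq_of_perm_of_pairwise_lt xs ys _ hp (hs.imp ?_)
  intro a b h
  rw [Prod.Lex.lt_iff]
  exact h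

lemma pv_sorted2_fst_pairwise (xs : List (Int × Int)) :
    (PySem.List.sorted2 xs (fun q => q.1) (fun q => q.2)).Pairwise (fun u v => u.1 ≤ v.1) := by
  rw [pv_sorted2_eq_sorted_lex]
  refine (PySem.List.sorted_pairwise xs _).imp ?_
  intro a b h
  rw [Prod.Lex.le_iff] at h
  rcases h with h | h
  · exact le_of_lt h
  · exact le_of_eq h.1

-- getD through a row of modify-appends over distinct columns
lemma pv_getD_foldl_modify (l : List Int) (hl : l.Nodup) (iv : Int × Int) (z : Int) :
    ∀ d : PySem.Dict Int (List (Int × Int)),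
      ((l.foldl (fun d x => d.modify x [] (fun v => v ++ [iv])) d).getD z []) =
        d.getD z [] ++ (if z ∈ l then [iv] else []) := by
  induction l with
  | nil => simp
  | cons h t ih =>
    intro d
    rw [List.foldl_cons, ih (List.Nodup.of_cons hl), PySem.Dict.getD_modify]
    by_cases hz : z = h
    · subst hz
      have : z ∉ t := (List.nodup_cons.mp hl).1
      simp [this]
    · simp [hz, List.mem_cons]

-- the column-dict fold, with its step written out
lemma pv_cols_fold (len_x len_y radius x : Int) (path : List (Int × Int)) :
    ∀ d : PySem.Dict Int (List (Int × Int)),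
      ((path.foldl (fun d p =>
          if max 0 (2*p.2 - radius) < min len_y (2*p.2 + radius + 1) then
            (PySem.List.pyRange (max 0 (2*p.1 - radius)) (min len_x (2*p.1 + radius + 1)) 1).foldl
              (fun d x => d.modify x []
                (fun l => l ++ [(max 0 (2*p.2 - radius), min len_y (2*p.2 + radius + 1))])) d
          else d) d).getD x []) = d.getD x [] ++ pvIvs path len_x len_y radius x := by
  induction path with
  | nil => simp [pvIvs]
  | cons p t ih =>
    intro d
    rw [List.foldl_cons, ih]
    have hstep : ((if max 0 (2*p.2 - radius) < min len_y (2*p.2 + radius + 1) then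
        (PySem.List.pyRange (max 0 (2*p.1 - radius)) (min len_x (2*p.1 + radius + 1)) 1).foldl
          (fun d x => d.modify x []
            (fun l => l ++ [(max 0 (2*p.2 - radius), min len_y (2*p.2 + radius + 1))])) d
      else d) : PySem.Dict Int (List (Int × Int))).getD x [] =
        d.getD x [] ++ (if (decide (max 0 (2*p.2 - radius) < min len_y (2*p.2 + radius + 1)) &&
          decide (max 0 (2*p.1 - radius) ≤ x) && decide (x < min len_x (2*p.1 + radius + 1)))
          then [(max 0 (2*p.2 - radius), min len_y (2*p.2 + radius + 1))] else []) := by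
      by_cases hy : max 0 (2*p.2 - radius) < min len_y (2*p.2 + radius + 1)
      · rw [if_pos hy, pv_getD_foldl_modify _ (PySem.List.nodup_pyRange_one _ _) _ x]
        by_cases hx : max 0 (2*p.1 - radius) ≤ x ∧ x < min len_x (2*p.1 + radius + 1)
        · rw [if_pos (PySem.List.mem_pyRange_one.mpr hx)]
          simp [hy, hx.1, hx.2]
        · rw [if_neg (fun hc => hx (PySem.List.mem_pyRange_one.mp hc))]
          rw [Decidable.not_and_iff_not_or_not] at hx
          rcases hx with hx | hx <;> simp [hx]
      · rw [if_neg hy]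
        simp [hy]
    rw [hstep, List.append_assoc]
    congr 1
    simp only [pvIvs, List.filter_cons]
    by_cases hc : (decide (max 0 (2*p.2 - radius) < min len_y (2*p.2 + radius + 1)) &&
        decide (max 0 (2*p.1 - radius) ≤ x) && decide (x < min len_x (2*p.1 + radius + 1))) = true
    · simp only [if_pos hc, List.map_cons, List.singleton_append]
    · simp only [if_neg hc, List.nil_append]

lemma pv_cols_eq_fold (path : List (Int × Int)) (len_x len_y radius : Int) :
    pvCols path len_x len_y radius =
      path.foldl (fun d p =>
        if max 0 (2*p.2 - radius) < min len_y (2*p.2 + radius + 1) then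
          (PySem.List.pyRange (max 0 (2*p.1 - radius)) (min len_x (2*p.1 + radius + 1)) 1).foldl
            (fun d x => d.modify x []
              (fun l => l ++ [(max 0 (2*p.2 - radius), min len_y (2*p.2 + radius + 1))])) d
        else d) PySem.Dict.empty := rfl

lemma pv_getD_cols (path : List (Int × Int)) (len_x len_y radius x : Int) :
    (pvCols path len_x len_y radius).getD x [] = pvIvs path len_x len_y radius x := by
  rw [pv_cols_eq_fold, pv_cols_fold]
  simp [PySem.Dict.getD_empty]

-- every key of the column dict has a nonempty value, and keys are unique
lemma pv_cols_keys_inv (path : List (Int × Int)) (len_x len_y radius : Int) :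
    (∀ z, z ∈ (pvCols path len_x len_y radius).keys ↔
        (pvCols path len_x len_y radius).getD z [] ≠ []) ∧
      (pvCols path len_x len_y radius).keys.Nodup := by
  rw [pv_cols_eq_fold]
  suffices h : ∀ d : PySem.Dict Int (List (Int × Int)),
      ((∀ z, z ∈ d.keys ↔ d.getD z [] ≠ []) ∧ d.keys.Nodup) →
      ((∀ z, z ∈ (path.foldl _ d).keys ↔ (path.foldl _ d).getD z [] ≠ []) ∧
        (path.foldl _ d).keys.Nodup) by
    refine h PySem.Dict.empty ⟨fun z => ?_, ?_⟩
    · simp [PySem.Dict.keys_empty, PySem.Dict.getD_empty]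
    · simp [PySem.Dict.keys_empty]
  induction path with
  | nil => exact fun d h => h
  | cons p t ih =>
    intro d hd
    rw [List.foldl_cons]
    refine ih _ ?_
    by_cases hy : max 0 (2*p.2 - radius) < min len_y (2*p.2 + radius + 1)
    · rw [if_pos hy]
      generalize PySem.List.pyRange (max 0 (2*p.1 - radius)) (min len_x (2*p.1 + radius + 1)) 1 = l
      clear hy
      induction l generalizing d with
      | nil => exact hd
      | cons a s ihs =>
        rw [List.foldl_cons]
        refine ihs _ ⟨fun z => ?_, ?_⟩
        · rw [PySem.Dict.getD_modify]
          have hk : z ∈ (PySem.Dict.modify d a []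
              (fun l => l ++ [(max 0 (2*p.2 - radius), min len_y (2*p.2 + radius + 1))])).keys ↔
              z = a ∨ z ∈ d.keys := by
            rw [PySem.Dict.keys_modify, PySem.Dict.mem_keys_insert]
          rw [hk]
          by_cases hz : z = a
          · simp [hz]
          · rw [if_neg hz, (hd.1 z)]
            simp [hz]
        · rw [PySem.Dict.keys_modify]
          exact PySem.Dict.nodup_keys_insert _ _ _ hd.2
    · rw [if_neg hy]
      exact hd

-- merge-loop invariant: folding sorted nonempty intervals keeps a gap-separated chain
-- covering exactly the processed intervals
lemma pv_merge_inv (S : List (Int × Int)) :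
    ∀ (ms : List (Int × Int)) (c : Int × Int),
      (∀ iv ∈ S, iv.1 < iv.2) → S.Pairwise (fun u v => u.1 ≤ v.1) →
      (∀ iv ∈ S, c.1 ≤ iv.1) →
      ms.Pairwise (fun u v => u.2 < v.1) → (∀ u ∈ ms, u.1 < u.2) →
      (∀ u ∈ ms, u.2 < c.1) → c.1 < c.2 →
      (pvFlush (S.foldl pvMergeStep (ms, some c))).Pairwise (fun u v => u.2 < v.1) ∧
      (∀ u ∈ pvFlush (S.foldl pvMergeStep (ms, some c)), u.1 < u.2) ∧
      (∀ y, pvCov (pvFlush (S.foldl pvMergeStep (ms, some c))) y ↔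
        pvCov ms y ∨ (c.1 ≤ y ∧ y < c.2) ∨ pvCov S y) := by
  induction S with
  | nil =>
    intro ms c _ _ _ hms1 hms2 hmsc hc
    refine ⟨?_, ?_, fun y => ?_⟩
    · exact List.pairwise_append.mpr ⟨hms1, List.pairwise_singleton _ _,
        fun u hu v hv => by rw [List.mem_singleton] at hv; subst hv; exact hmsc u hu⟩
    · intro u hu
      rcases List.mem_append.mp hu with h | h
      · exact hms2 u h
      · rw [List.mem_singleton] at h; subst h; exact hc
    · rw [show pvFlush ((List.foldl pvMergeStep (ms, some c) [])) = ms ++ [c] from rfl,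
        pvCov_append]
      simp [pvCov]
  | cons ab t ih =>
    intro ms c hS1 hS2 hcS hms1 hms2 hmsc hc
    rw [List.foldl_cons]
    by_cases hab : ab.1 ≤ c.2
    · rw [show pvMergeStep (ms, some c) ab = (ms, some (c.1, max c.2 ab.2)) by
        simp [pvMergeStep, hab]]
      have hcab : c.1 ≤ ab.1 := hcS ab List.mem_cons_self
      obtain ⟨h1, h2, h3⟩ := ih ms (c.1, max c.2 ab.2)
        (fun iv hiv => hS1 iv (List.mem_cons_of_mem _ hiv))
        (List.Pairwise.of_cons hS2)
        (fun iv hiv => hcS iv (List.mem_cons_of_mem _ hiv))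
        hms1 hms2 hmsc (by simp only; omega)
      refine ⟨h1, h2, fun y => ?_⟩
      rw [h3 y]
      have habt : ∀ iv ∈ t, ab.1 ≤ iv.1 := fun iv hiv =>
        (List.pairwise_cons.mp hS2).1 iv hiv
      have hab2 : ab.1 < ab.2 := hS1 ab List.mem_cons_self
      constructor
      · rintro (h | h | h)
        · exact Or.inl h
        · simp only at h
          by_cases hy : y < c.2
          · exact Or.inr (Or.inl ⟨h.1, hy⟩)
          · exact Or.inr (Or.inr ⟨ab, List.mem_cons_self, by omega⟩)
        · rcases h with ⟨iv, hiv, hy⟩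
          exact Or.inr (Or.inr ⟨iv, List.mem_cons_of_mem _ hiv, hy⟩)
      · rintro (h | h | ⟨iv, hiv, hy⟩)
        · exact Or.inl h
        · exact Or.inr (Or.inl (by simp only; omega))
        · rcases List.mem_cons.mp hiv with rfl | hiv'
          · exact Or.inr (Or.inl (by simp only; omega))
          · exact Or.inr (Or.inr ⟨iv, hiv', hy⟩)
    · rw [show pvMergeStep (ms, some c) ab = (ms ++ [c], some ab) by
        simp [pvMergeStep, hab]]
      rw [not_le] at hab
      have hab2 : ab.1 < ab.2 := hS1 ab List.mem_cons_self
      obtain ⟨h1, h2, h3⟩ := ih (ms ++ [c]) ab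
        (fun iv hiv => hS1 iv (List.mem_cons_of_mem _ hiv))
        (List.Pairwise.of_cons hS2)
        (fun iv hiv => (List.pairwise_cons.mp hS2).1 iv hiv)
        (List.pairwise_append.mpr ⟨hms1, List.pairwise_singleton _ _,
          fun u hu v hv => by rw [List.mem_singleton] at hv; subst hv; exact hmsc u hu⟩)
        (fun u hu => by
          rcases List.mem_append.mp hu with h | h
          · exact hms2 u h
          · rw [List.mem_singleton] at h; subst h; exact hc)
        (fun u hu => by
          rcases List.mem_append.mp hu with h | h
          · have := hmsc u h; omega
          · rw [List.mem_singleton] at h; subst h; exact hab)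
        hab2
      refine ⟨h1, h2, fun y => ?_⟩
      rw [h3 y, pvCov_append]
      have : pvCov [c] y ↔ c.1 ≤ y ∧ y < c.2 := by simp [pvCov]
      rw [this]
      constructor
      · rintro ((h | h) | h | ⟨iv, hiv, hy⟩)
        · exact Or.inl h
        · exact Or.inr (Or.inl h)
        · exact Or.inr (Or.inr ⟨ab, List.mem_cons_self, h⟩)
        · exact Or.inr (Or.inr ⟨iv, List.mem_cons_of_mem _ hiv, hy⟩)
      · rintro (h | h | ⟨iv, hiv, hy⟩)
        · exact Or.inl (Or.inl h)
        · exact Or.inl (Or.inr h)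
        · rcases List.mem_cons.mp hiv with rfl | hiv'
          · exact Or.inr (Or.inl hy)
          · exact Or.inr (Or.inr ⟨iv, hiv', hy⟩)

-- the merged intervals of a column: separated, nonempty, covering exactly pvIvs
lemma pv_merged_spec (path : List (Int × Int)) (len_x len_y radius x : Int) :
    (pvMerged path len_x len_y radius x).Pairwise (fun u v => u.2 < v.1) ∧
    (∀ u ∈ pvMerged path len_x len_y radius x, u.1 < u.2) ∧
    (∀ y, pvCov (pvMerged path len_x len_y radius x) y ↔
      pvCov (pvIvs path len_x len_y radius x) y) := by
  have hne : ∀ iv ∈ pvIvs path len_x len_y radius x, iv.1 < iv.2 := by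
    intro iv hiv
    rw [pv_mem_ivs] at hiv
    obtain ⟨p, _, h1, _, _, hEq⟩ := hiv
    rw [hEq]
    exact h1
  unfold pvMerged
  set S := PySem.List.sorted2 (pvIvs path len_x len_y radius x) (fun q => q.1) (fun q => q.2)
    with hSdef
  have hperm : S.Perm (pvIvs path len_x len_y radius x) :=
    PySem.List.sorted2_perm _ _ _ _
  have hS1 : ∀ iv ∈ S, iv.1 < iv.2 := fun iv hiv => hne iv (hperm.mem_iff.mp hiv)
  have hS2 : S.Pairwise (fun u v => u.1 ≤ v.1) := pv_sorted2_fst_pairwise _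
  have hcovS : ∀ y, pvCov S y ↔ pvCov (pvIvs path len_x len_y radius x) y := by
    intro y
    unfold pvCov
    constructor
    · rintro ⟨iv, hiv, h⟩; exact ⟨iv, hperm.mem_iff.mp hiv, h⟩
    · rintro ⟨iv, hiv, h⟩; exact ⟨iv, hperm.mem_iff.mpr hiv, h⟩
  cases hS : S with
  | nil =>
    refine ⟨by simp [pvFlush], by simp [pvFlush], fun y => ?_⟩
    rw [← hcovS y, hS]
    simp [pvFlush, pvCov]
  | cons ab t =>
    rw [hS] at hS1 hS2
    have hab2 : ab.1 < ab.2 := hS1 ab List.mem_cons_self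
    obtain ⟨h1, h2, h3⟩ := pv_merge_inv t [] ab
      (fun iv hiv => hS1 iv (List.mem_cons_of_mem _ hiv))
      (List.Pairwise.of_cons hS2)
      (fun iv hiv => (List.pairwise_cons.mp hS2).1 iv hiv)
      (List.Pairwise.nil) (by simp) (by simp) hab2
    rw [List.foldl_cons,
      show pvMergeStep ([], none) ab = ([], some ab) from rfl]
    refine ⟨h1, h2, fun y => ?_⟩
    rw [h3 y, ← hcovS y, hS]
    simp only [pvCov, List.mem_cons, List.not_mem_nil]
    constructor
    · rintro (⟨iv, h, _⟩ | h | ⟨iv, hiv, h⟩)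
      · exact absurd h (by simp)
      · exact ⟨ab, Or.inl rfl, h⟩
      · exact ⟨iv, Or.inr hiv, h⟩
    · rintro ⟨iv, h | h, hy⟩
      · subst h; exact Or.inr (Or.inl hy)
      · exact Or.inr (Or.inr ⟨iv, h, hy⟩)

-- B's result, written as one flatMap over the sorted populated columns
lemma pv_alt_eq (path : List (Int × Int)) (len_x len_y radius : Int) :
    expand_window_py_alt path len_x len_y radius =
      (PySem.List.sorted (pvCols path len_x len_y radius).keys (fun k => k)).flatMap
        (fun x => (pvMerged path len_x len_y radius x).flatMap
          (fun iv => (PySem.List.pyRange iv.1 iv.2 1).map (fun y => (x, y)))) := by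
  show (PySem.List.sorted (pvCols path len_x len_y radius).keys (fun k => k)).foldl
      (fun out x =>
        (pvFlush ((PySem.List.sorted2 ((pvCols path len_x len_y radius).getD x [])
            (fun q => q.1) (fun q => q.2)).foldl pvMergeStep ([], none))).foldl
          (fun out iv => out ++ (PySem.List.pyRange iv.1 iv.2 1).map (fun y => (x, y))) out) [] = _
  rw [PySem.List.foldl_congr_mem _ _
    (fun out x => out ++ (pvMerged path len_x len_y radius x).flatMap
      (fun iv => (PySem.List.pyRange iv.1 iv.2 1).map (fun y => (x, y)))) []
    (fun acc x _ => by
      rw [pv_getD_cols]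
      exact PySem.List.foldl_append_eq_flatMap _ _ _)]
  rw [PySem.List.foldl_append_eq_flatMap]
  simp

-- the populated columns, sorted: strictly increasing, members = columns with a bucket
lemma pv_sortedKeys_lt (path : List (Int × Int)) (len_x len_y radius : Int) :
    (PySem.List.sorted (pvCols path len_x len_y radius).keys (fun k => k)).Pairwise (· < ·) := by
  have hle := PySem.List.sorted_pairwise (pvCols path len_x len_y radius).keys (fun k => k)
  have hnd : (PySem.List.sorted (pvCols path len_x len_y radius).keys (fun k => k)).Nodup :=
    (PySem.List.sorted_perm _ _ _).symm.nodup (pv_cols_keys_inv path len_x len_y radius).2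
  exact (hle.and hnd).imp (fun h => lt_of_le_of_ne h.1 h.2)

lemma pv_mem_sortedKeys (path : List (Int × Int)) (len_x len_y radius x : Int) :
    x ∈ PySem.List.sorted (pvCols path len_x len_y radius).keys (fun k => k) ↔
      pvIvs path len_x len_y radius x ≠ [] := by
  rw [PySem.List.mem_sorted, (pv_cols_keys_inv path len_x len_y radius).1 x, pv_getD_cols]


-- membership in B's result is exactly membership in some window rectangle
lemma pv_mem_alt (path : List (Int × Int)) (len_x len_y radius : Int) (q : Int × Int) :
    q ∈ expand_window_py_alt path len_x len_y radius ↔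
      ∃ p ∈ path, pvInWin len_x len_y radius p q := by
  rw [pv_alt_eq]
  simp only [List.mem_flatMap, List.mem_map]
  constructor
  · rintro ⟨x, hx, iv, hiv, y, hy, rfl⟩
    rw [PySem.List.mem_pyRange_one] at hy
    have hcov : pvCov (pvIvs path len_x len_y radius x) y :=
      ((pv_merged_spec path len_x len_y radius x).2.2 y).mp ⟨iv, hiv, hy⟩
    obtain ⟨iv', hiv', hy'⟩ := hcov
    rw [pv_mem_ivs] at hiv'
    obtain ⟨p, hp, _, hx1, hx2, hEq⟩ := hiv'
    rw [hEq] at hy'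
    exact ⟨p, hp, hx1, hx2, hy'.1, hy'.2⟩
  · rintro ⟨p, hp, h1, h2, h3, h4⟩
    have hmem : (max 0 (2*p.2 - radius), min len_y (2*p.2 + radius + 1)) ∈
        pvIvs path len_x len_y radius q.1 := by
      rw [pv_mem_ivs]
      exact ⟨p, hp, by omega, h1, h2, rfl⟩
    have hcov : pvCov (pvMerged path len_x len_y radius q.1) q.2 :=
      ((pv_merged_spec path len_x len_y radius q.1).2.2 q.2).mpr ⟨_, hmem, h3, h4⟩
    obtain ⟨iv, hiv, hy⟩ := hcov
    refine ⟨q.1, ?_, iv, hiv, q.2, ?_, rfl⟩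
    · rw [pv_mem_sortedKeys]
      intro hnil
      rw [hnil] at hmem
      exact absurd hmem (List.not_mem_nil)
    · rw [PySem.List.mem_pyRange_one]; exact hy

-- B's result is strictly increasing in the lexicographic cell order
lemma pv_alt_pairwise (path : List (Int × Int)) (len_x len_y radius : Int) :
    (expand_window_py_alt path len_x len_y radius).Pairwise pvLexLT := by
  rw [pv_alt_eq, List.pairwise_flatMap]
  constructor
  · intro x _
    rw [List.pairwise_flatMap]
    constructor
    · intro iv _
      exact (PySem.List.pairwise_lt_pyRange_one iv.1 iv.2).map _
        (fun a b h => Or.inr ⟨rfl, h⟩)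
    · refine ((pv_merged_spec path len_x len_y radius x).1).imp ?_
      rintro iv iv' h u hu v hv
      simp only [List.mem_map, PySem.List.mem_pyRange_one] at hu hv
      obtain ⟨y, hy, rfl⟩ := hu
      obtain ⟨y', hy', rfl⟩ := hv
      exact Or.inr ⟨rfl, by omega⟩
  · refine (pv_sortedKeys_lt path len_x len_y radius).imp ?_
    rintro x x' h u hu v hv
    simp only [List.mem_flatMap, List.mem_map] at hu hv
    obtain ⟨_, _, y, _, rfl⟩ := hu
    obtain ⟨_, _, y', _, rfl⟩ := hv
    exact Or.inl h

lemma pv_alt_nodup (path : List (Int × Int)) (len_x len_y radius : Int) :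
    (expand_window_py_alt path len_x len_y radius).Nodup :=
  (pv_alt_pairwise path len_x len_y radius).imp (by
    rintro u v (h | ⟨_, h⟩) rfl <;> exact lt_irrefl _ h)

-- ===== VERDICT (by name: the statement is the Claim_ definition above) =====
theorem expand_window_py_spec : Claim_equal_expand_window_py := by
  intro path len_x len_y radius _
  show expand_window_py path len_x len_y radius = expand_window_py_alt path len_x len_y radius
  have hA : expand_window_py path len_x len_y radius =
      PySem.List.sorted2 (pvWindow path len_x len_y radius) (fun q => q.1) (fun q => q.2) := rfl
  rw [hA]
  refine pv_sorted2_eq_of_pairwise _ _ ?_ ?_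
  · rw [List.perm_ext_iff_of_nodup (pv_alt_nodup path len_x len_y radius)
      (pv_nodup_window path len_x len_y radius)]
    intro q
    rw [pv_mem_alt, pv_mem_window]
  · exact pv_alt_pairwise path len_x len_y radius
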